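-- pv_equiv track=rewrite | github.com/tpavic1/ABI | chapter6/BA6C.py | ColoredEdges
-- ===== SOURCE A (Python) =====
-- def ColoredEdges(P):
--     edges=[]
--     for kromosom in P:
--         nodes=ChromosomeToCycle(kromosom)
--         for j in range(1,len(nodes),2):
--             if j!=len(nodes)-1:
--                 edges.append([nodes[j],nodes[j+1]])
--             else:
--                 edges.append([nodes[j],nodes[0]])
--     return edges
--
-- def ChromosomeToCycle(kromosom):
--     nodes=[]
--     for el in kromosom:
--         if el>0:
--             nodes.append(2*el-1)
--             nodes.append(2*el)
--         else:
--             nodes.append(-2*el)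
--             nodes.append(-2*el-1)
--     return nodes
-- ===== SOURCE B (Python) =====
-- def ColoredEdges(P):
--     edges = []
--     for c in P:
--         tails = [2 * e if e > 0 else -2 * e - 1 for e in c]
--         heads = [2 * e - 1 if e > 0 else -2 * e for e in c]
--         edges.extend([t, h] for t, h in zip(tails, heads[1:] + heads[:1]))
--     return edges
-- ===== Notes on version B (the rewrite author's own statement) =====
-- stated objective: alternative
-- what changed: B never builds the doubled node list and never indexes: per chromosome it maps out a tails list and a heads list, rotates the heads list left by one, and zips the two lists into edges, so the wrap-around is a list rotation instead of a last-index branch.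
import Mathlib
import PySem

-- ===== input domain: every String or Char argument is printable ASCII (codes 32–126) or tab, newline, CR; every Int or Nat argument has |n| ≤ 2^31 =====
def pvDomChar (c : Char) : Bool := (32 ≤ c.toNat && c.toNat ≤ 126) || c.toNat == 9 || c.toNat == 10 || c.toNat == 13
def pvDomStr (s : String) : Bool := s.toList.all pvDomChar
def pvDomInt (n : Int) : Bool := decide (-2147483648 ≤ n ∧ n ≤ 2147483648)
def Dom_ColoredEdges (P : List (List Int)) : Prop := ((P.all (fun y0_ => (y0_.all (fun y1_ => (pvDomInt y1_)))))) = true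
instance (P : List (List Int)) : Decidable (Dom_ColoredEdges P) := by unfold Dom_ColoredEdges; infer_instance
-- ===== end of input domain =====

-- B replaces the node-list-and-odd-index scan by: map out tails and heads lists per chromosome,
-- rotate the heads list left by one, zip the two lists into edges (objective: alternative).

-- ===== PORT A =====
def ChromosomeToCycle (kromosom : List Int) : List Int :=
  kromosom.foldl (fun nodes el =>
    if el > 0 then (nodes ++ [2 * el - 1]) ++ [2 * el]
    else (nodes ++ [-2 * el]) ++ [-2 * el - 1]) []

def ColoredEdges (P : List (List Int)) : List (List Int) :=
  P.foldl (fun edges kromosom =>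
    let nodes := ChromosomeToCycle kromosom
    -- indices j, j+1 are always in range, so pyGetD is exact here
    (PySem.List.pyRange 1 (nodes.length : Int) 2).foldl (fun edges j =>
      if j ≠ (nodes.length : Int) - 1 then
        edges ++ [[PySem.List.pyGetD nodes j 0, PySem.List.pyGetD nodes (j + 1) 0]]
      else
        edges ++ [[PySem.List.pyGetD nodes j 0, PySem.List.pyGetD nodes 0 0]]) edges) []

-- ===== PORT B =====
-- heads[1:] and heads[:1] are slices with nonnegative literal bounds: exactly List.drop 1 / List.take 1
def ColoredEdges_alt (P : List (List Int)) : List (List Int) :=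
  P.foldl (fun edges c =>
    let tails := c.map (fun e => if e > 0 then 2 * e else -2 * e - 1)
    let heads := c.map (fun e => if e > 0 then 2 * e - 1 else -2 * e)
    edges ++ (tails.zip (heads.drop 1 ++ heads.take 1)).map (fun p => [p.1, p.2])) []

-- ===== PRECONDITION & SPEC =====
def Spec_ColoredEdges (P : List (List Int)) (out : List (List Int)) : Prop := out = ColoredEdges_alt P
instance (P : List (List Int)) (out : List (List Int)) : Decidable (Spec_ColoredEdges P out) := by unfold Spec_ColoredEdges; infer_instance

-- ===== CLAIM (what is proved, stated in full; the proofs are below) =====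
def Claim_equal_ColoredEdges : Prop := ∀ (P : List (List Int)), Dom_ColoredEdges P → Spec_ColoredEdges P (ColoredEdges P)

-- ===== LEMMAS AND PROOFS =====

def pvHd (e : Int) : Int := if e > 0 then 2 * e - 1 else -2 * e
def pvTl (e : Int) : Int := if e > 0 then 2 * e else -2 * e - 1
def pvG (e : Int) : List Int := [pvHd e, pvTl e]
def pvEdge (c : List Int) (k : Nat) : List Int :=
  [pvTl (c.getD k 0), pvHd (c.getD ((k + 1) % c.length) 0)]

lemma ctc_foldl (c : List Int) : ∀ (acc : List Int),
    c.foldl (fun nodes el =>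
      if el > 0 then (nodes ++ [2 * el - 1]) ++ [2 * el]
      else (nodes ++ [-2 * el]) ++ [-2 * el - 1]) acc = acc ++ c.flatMap pvG := by
  induction c with
  | nil => intro acc; simp
  | cons e rest ih =>
    intro acc
    simp only [List.foldl_cons]
    by_cases h : e > 0
    · rw [if_pos h, ih, List.flatMap_cons]
      simp [pvG, pvHd, pvTl, h]
    · rw [if_neg h, ih, List.flatMap_cons]
      simp [pvG, pvHd, pvTl, h]

lemma ctc_eq (c : List Int) : ChromosomeToCycle c = c.flatMap pvG := by
  unfold ChromosomeToCycle
  rw [ctc_foldl c []]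
  simp

lemma flat_len (c : List Int) : (c.flatMap pvG).length = 2 * c.length := by
  induction c with
  | nil => simp
  | cons e rest ih => simp [pvG, ih]; omega

lemma flat_get_even (c : List Int) : ∀ (k : Nat), k < c.length →
    (c.flatMap pvG)[2 * k]? = some (pvHd (c.getD k 0)) := by
  induction c with
  | nil => intro k h; simp at h
  | cons e rest ih =>
    intro k h
    cases k with
    | zero => simp [pvG]
    | succ k =>
      have : 2 * (k + 1) = (pvG e).length + 2 * k := by simp [pvG]; omega
      rw [List.flatMap_cons, this, List.getElem?_append_right (by simp)]
      simpa [pvG] using ih k (by simpa using h)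

lemma flat_get_odd (c : List Int) : ∀ (k : Nat), k < c.length →
    (c.flatMap pvG)[2 * k + 1]? = some (pvTl (c.getD k 0)) := by
  induction c with
  | nil => intro k h; simp at h
  | cons e rest ih =>
    intro k h
    cases k with
    | zero => simp [pvG]
    | succ k =>
      have : 2 * (k + 1) + 1 = (pvG e).length + (2 * k + 1) := by simp [pvG]; omega
      rw [List.flatMap_cons, this, List.getElem?_append_right (by simp)]
      simpa [pvG] using ih k (by simpa using h)

lemma pyRange_two (m : Nat) :
    PySem.List.pyRange 1 ((2 * m : Nat) : Int) 2 =
      (List.range m).map (fun k : Nat => (1 : Int) + 2 * (k : Int)) := by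
  rw [PySem.List.pyRange_of_pos _ _ (by norm_num)]
  have hcount : (if (1 : Int) < ((2 * m : Nat) : Int)
      then ((((2 * m : Nat) : Int) - 1 + 2 - 1) / 2).toNat else 0) = m := by
    rcases Nat.eq_zero_or_pos m with h | h
    · simp [h]
    · rw [if_pos (by push_cast; omega)]
      have h2 : (((2 * m : Nat) : Int) - 1 + 2 - 1) / 2 = (m : Int) := by
        push_cast; omega
      rw [h2]; simp
  rw [hcount]

lemma fold_map_singleton {α β γ : Type} (g : α → β) (F : List γ → β → List γ) (f : α → γ)
    (l : List α) (h : ∀ (acc : List γ), ∀ x ∈ l, F acc (g x) = acc ++ [f x]) :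
    ∀ (acc : List γ), (l.map g).foldl F acc = acc ++ l.map f := by
  induction l with
  | nil => intro acc; simp
  | cons x xs ih =>
    intro acc
    simp only [List.map_cons, List.foldl_cons]
    rw [h acc x (List.mem_cons_self), ih (fun acc y hy => h acc y (List.mem_cons_of_mem _ hy)),
      List.append_assoc]
    rfl

lemma inner_A (c : List Int) (edges : List (List Int)) :
    (PySem.List.pyRange 1 ((ChromosomeToCycle c).length : Int) 2).foldl (fun edges j =>
      if j ≠ ((ChromosomeToCycle c).length : Int) - 1 then
        edges ++ [[PySem.List.pyGetD (ChromosomeToCycle c) j 0,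
                   PySem.List.pyGetD (ChromosomeToCycle c) (j + 1) 0]]
      else
        edges ++ [[PySem.List.pyGetD (ChromosomeToCycle c) j 0,
                   PySem.List.pyGetD (ChromosomeToCycle c) 0 0]]) edges
    = edges ++ (List.range c.length).map (pvEdge c) := by
  have hn : ChromosomeToCycle c = c.flatMap pvG := ctc_eq c
  have hlen : (ChromosomeToCycle c).length = 2 * c.length := by rw [hn]; exact flat_len c
  rw [hlen, pyRange_two]
  refine fold_map_singleton (fun k : Nat => (1 : Int) + 2 * (k : Int)) _ (pvEdge c) (List.range c.length)
    ?_ edges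
  intro acc k hk'
  have hk : k < c.length := List.mem_range.mp hk'
  beta_reduce
  have hget : ∀ (n : Nat), PySem.List.pyGetD (ChromosomeToCycle c) ((n : Nat) : Int) 0
      = (ChromosomeToCycle c).getD n 0 := by
    intro n; simp [PySem.List.pyGetD_natCast]
  have hcast : (1 : Int) + 2 * (k : Int) = ((2 * k + 1 : Nat) : Int) := by push_cast; ring
  have hj : PySem.List.pyGetD (ChromosomeToCycle c) ((1 : Int) + 2 * k) 0
      = pvTl (c.getD k 0) := by
    rw [hcast, hget, List.getD_eq_getElem?_getD, hn]
    simp [flat_get_odd c k hk]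
  by_cases hlast : k = c.length - 1
  · have hne : ¬ ((1 : Int) + 2 * k ≠ ((2 * c.length : Nat) : Int) - 1) := by
      push_cast; omega
    rw [if_neg hne]
    have h0 : PySem.List.pyGetD (ChromosomeToCycle c) 0 0 = pvHd (c.getD 0 0) := by
      have h0' := flat_get_even c 0 (by omega)
      simp only [Nat.mul_zero] at h0'
      have hg0 := hget 0
      simp only [Nat.cast_zero] at hg0
      rw [hg0, List.getD_eq_getElem?_getD, hn]
      simp [h0']
    have hmod : (k + 1) % c.length = 0 := by
      rw [hlast, Nat.sub_add_cancel (by omega), Nat.mod_self]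
    simp [pvEdge, hj, h0, hmod]
  · have hne : (1 : Int) + 2 * k ≠ ((2 * c.length : Nat) : Int) - 1 := by
      push_cast; omega
    rw [if_pos hne]
    have hk1 : k + 1 < c.length := by omega
    have hcast2 : (1 : Int) + 2 * (k : Int) + 1 = ((2 * (k + 1) : Nat) : Int) := by
      push_cast; ring
    have hnext : PySem.List.pyGetD (ChromosomeToCycle c) ((1 : Int) + 2 * k + 1) 0
        = pvHd (c.getD (k + 1) 0) := by
      rw [hcast2, hget, List.getD_eq_getElem?_getD, hn]
      simp [flat_get_even c (k + 1) hk1]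
    have hmod : (k + 1) % c.length = k + 1 := Nat.mod_eq_of_lt hk1
    simp [pvEdge, hj, hnext, hmod]

lemma zip_rot_eq (c : List Int) :
    ((c.map pvTl).zip ((c.map pvHd).drop 1 ++ (c.map pvHd).take 1)).map (fun p => [p.1, p.2])
      = (List.range c.length).map (pvEdge c) := by
  apply List.ext_getElem
  · simp; omega
  · intro i h1 h2
    have hi : i < c.length := by simpa using h2
    simp only [List.getElem_map, List.getElem_zip, List.getElem_range]
    unfold pvEdge
    rw [List.getD_eq_getElem c 0 hi]
    congr 1
    congr 1
    by_cases hlast : i + 1 < c.length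
    · have hdlen : i < ((c.map pvHd).drop 1).length := by simp; omega
      rw [List.getElem_append_left hdlen, List.getElem_drop]
      have hmod : (i + 1) % c.length = i + 1 := Nat.mod_eq_of_lt hlast
      rw [hmod, List.getD_eq_getElem c 0 hlast]
      have h1i : 1 + i = i + 1 := by omega
      simp only [h1i, List.getElem_map]
    · have heq : i = c.length - 1 := by omega
      rw [List.getElem_append_right (by simp; omega)]
      have hmod : (i + 1) % c.length = 0 := by
        rw [heq, Nat.sub_add_cancel (by omega), Nat.mod_self]
      rw [hmod]
      have h0 : 0 < c.length := by omega
      have hidx : i - ((c.map pvHd).drop 1).length = 0 := by simp; omega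
      simp only [hidx]
      rw [List.getElem_take]
      simp [List.getD_eq_getElem?_getD, List.getElem?_eq_getElem h0]

lemma outer_fold_A (P : List (List Int)) : ∀ (acc : List (List Int)),
    P.foldl (fun edges kromosom =>
      let nodes := ChromosomeToCycle kromosom
      (PySem.List.pyRange 1 (nodes.length : Int) 2).foldl (fun edges j =>
        if j ≠ (nodes.length : Int) - 1 then
          edges ++ [[PySem.List.pyGetD nodes j 0, PySem.List.pyGetD nodes (j + 1) 0]]
        else
          edges ++ [[PySem.List.pyGetD nodes j 0, PySem.List.pyGetD nodes 0 0]]) edges) acc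
    = acc ++ P.flatMap (fun c => (List.range c.length).map (pvEdge c)) := by
  induction P with
  | nil => intro acc; simp
  | cons c rest ih =>
    intro acc
    simp only [List.foldl_cons, List.flatMap_cons]
    rw [inner_A c acc, ih, List.append_assoc]

lemma outer_fold_B (P : List (List Int)) : ∀ (acc : List (List Int)),
    P.foldl (fun edges c =>
      let tails := c.map (fun e => if e > 0 then 2 * e else -2 * e - 1)
      let heads := c.map (fun e => if e > 0 then 2 * e - 1 else -2 * e)
      edges ++ (tails.zip (heads.drop 1 ++ heads.take 1)).map (fun p => [p.1, p.2])) acc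
    = acc ++ P.flatMap (fun c => (List.range c.length).map (pvEdge c)) := by
  induction P with
  | nil => intro acc; simp
  | cons c rest ih =>
    intro acc
    simp only [List.foldl_cons, List.flatMap_cons]
    have hb : (fun e => if e > 0 then 2 * e else -2 * e - 1) = pvTl := by
      funext e; simp [pvTl]
    have hh : (fun e : Int => if e > 0 then 2 * e - 1 else -2 * e) = pvHd := by
      funext e; simp [pvHd]
    simp only [hb, hh] at ih ⊢
    rw [zip_rot_eq, ih, List.append_assoc]

-- ===== VERDICT (by name: the statement is the Claim_ definition above) =====
theorem ColoredEdges_spec : Claim_equal_ColoredEdges := by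
  intro P _
  unfold Spec_ColoredEdges ColoredEdges ColoredEdges_alt
  rw [outer_fold_A P [], outer_fold_B P []]
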